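-- pv_equiv track=rewrite | github.com/LuanaSchlei/HackerRank_Python | capitalize/capitalize.py | solve
-- ===== SOURCE A (Python) =====
-- def solve(s):
--
--     saida = ''
--     procurando_letra = True
--     for letra in s:
--         if procurando_letra:
--             if letra != ' ':
--                 saida += letra.upper()
--                 procurando_letra = False
--             else:
--                 saida += letra
--         else:
--             if letra == ' ':
--                 procurando_letra = True
--                 saida += letra
--             else:
--                 saida += letra
--
--
--     return saida
-- ===== SOURCE B (Python) =====
-- def solve(s):
--     # Idiomatic: tokenize on single spaces, capitalize each token's first char, rejoin.
--     return ' '.join(w[:1].upper() + w[1:] for w in s.split(' '))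
-- ===== Notes on version B (the rewrite author's own statement) =====
-- stated objective: idiomatic
-- what changed: Replaces the char-by-char boolean state machine (with repeated string += concatenation) by a tokenize-on-single-space, capitalize-first-character, rejoin pipeline.
import Mathlib
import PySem

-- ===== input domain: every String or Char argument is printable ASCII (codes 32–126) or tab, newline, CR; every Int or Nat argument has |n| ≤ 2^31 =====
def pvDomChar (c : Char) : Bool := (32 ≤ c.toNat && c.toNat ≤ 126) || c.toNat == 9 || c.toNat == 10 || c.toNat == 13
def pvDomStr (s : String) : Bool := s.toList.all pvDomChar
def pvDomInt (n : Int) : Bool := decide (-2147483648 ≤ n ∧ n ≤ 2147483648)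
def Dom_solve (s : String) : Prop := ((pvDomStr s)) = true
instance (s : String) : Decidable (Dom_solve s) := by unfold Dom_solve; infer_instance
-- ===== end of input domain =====

-- B replaces A's char-by-char boolean state machine by split(' ') / capitalize each token / ' '.join (idiomatic).

-- ===== PORT A =====
-- literal port of A's loop: state = (saida, procurando_letra), one fold step per character
def solve (s : String) : String :=
  String.mk
    (s.toList.foldl
      (fun (st : List Char × Bool) letra =>
        if st.2 = true then
          if letra ≠ ' ' then (st.1 ++ [PySem.Chars.upperChar letra], false)
          else (st.1 ++ [letra], st.2)
        else
          if letra = ' ' then (st.1 ++ [letra], true)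
          else (st.1 ++ [letra], st.2))
      (([] : List Char), true)).1

-- ===== PORT B =====
-- s.split(' ') ported as List.splitOn ' ' (single-char sep, keeps empty tokens);
-- w[:1].upper() + w[1:] as upper (take 1) ++ drop 1; ' '.join as PySem.Chars.join
def solve_alt (s : String) : String :=
  String.mk (PySem.Chars.join [' ']
    ((s.toList.splitOn ' ').map (fun w => PySem.Chars.upper (w.take 1) ++ w.drop 1)))

-- ===== PRECONDITION & SPEC =====
def Spec_solve (s : String) (out : String) : Prop := out = solve_alt s
instance (s : String) (out : String) : Decidable (Spec_solve s out) := by unfold Spec_solve; infer_instance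

-- ===== CLAIM (what is proved, stated in full; the proofs are below) =====
def Claim_equal_solve : Prop := ∀ (s : String), Dom_solve s → Spec_solve s (solve s)

-- ===== LEMMAS AND PROOFS =====

-- A's fold step, named for the proofs (definitionally the lambda in `solve`)
def pvStep (st : List Char × Bool) (letra : Char) : List Char × Bool :=
  if st.2 = true then
    if letra ≠ ' ' then (st.1 ++ [PySem.Chars.upperChar letra], false)
    else (st.1 ++ [letra], st.2)
  else
    if letra = ' ' then (st.1 ++ [letra], true)
    else (st.1 ++ [letra], st.2)

-- A's state machine, recursively (b = procurando_letra)
def pvMach : List Char → Bool → List Char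
  | [], _ => []
  | c :: cs, true => if c = ' ' then c :: pvMach cs true else PySem.Chars.upperChar c :: pvMach cs false
  | c :: cs, false => if c = ' ' then c :: pvMach cs true else c :: pvMach cs false

def pvCap (w : List Char) : List Char := PySem.Chars.upper (w.take 1) ++ w.drop 1

lemma pv_foldl_mach (cs : List Char) : ∀ (acc : List Char) (b : Bool),
    (cs.foldl pvStep (acc, b)).1 = acc ++ pvMach cs b := by
  induction cs with
  | nil => intro acc b; simp [pvMach]
  | cons c cs ih =>
    intro acc b
    rw [List.foldl_cons]
    cases b
    · by_cases hc : c = ' '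
      · rw [show pvStep (acc, false) c = (acc ++ [c], true) by simp [pvStep, hc], ih]
        simp [pvMach, hc]
      · rw [show pvStep (acc, false) c = (acc ++ [c], false) by simp [pvStep, hc], ih]
        simp [pvMach, hc]
    · by_cases hc : c = ' '
      · rw [show pvStep (acc, true) c = (acc ++ [c], true) by simp [pvStep, hc], ih]
        simp [pvMach, hc]
      · rw [show pvStep (acc, true) c = (acc ++ [PySem.Chars.upperChar c], false) by
            simp [pvStep, hc], ih]
        simp [pvMach, hc]

lemma pv_splitOn_cons (c : Char) (cs : List Char) :
    (c :: cs).splitOn ' ' =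
      if c = ' ' then [] :: cs.splitOn ' '
      else (cs.splitOn ' ').modifyHead (c :: ·) := by
  by_cases hc : c = ' ' <;> simp [List.splitOn, List.splitOnP_cons, hc]

lemma pv_join_cons_head (c : Char) (w : List Char) (rest : List (List Char)) :
    PySem.Chars.join [' '] ((c :: w) :: rest) = c :: PySem.Chars.join [' '] (w :: rest) := by
  cases rest with
  | nil => simp [PySem.Chars.join_singleton]
  | cons q r => simp [PySem.Chars.join_cons_cons]

lemma pv_mach_eq (cs : List Char) :
    pvMach cs true = PySem.Chars.join [' '] ((cs.splitOn ' ').map pvCap) ∧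
    pvMach cs false = PySem.Chars.join [' ']
      ((cs.splitOn ' ').headI :: ((cs.splitOn ' ').tail).map pvCap) := by
  induction cs with
  | nil =>
    constructor <;> simp [pvMach, pvCap, List.splitOn, PySem.Chars.join_singleton, PySem.Chars.upper]
  | cons c cs ih =>
    obtain ⟨ih1, ih2⟩ := ih
    obtain ⟨w0, rest, hw⟩ : ∃ w0 rest, cs.splitOn ' ' = w0 :: rest := by
      cases h : cs.splitOn ' ' with
      | nil => exact absurd h (List.splitOnP_ne_nil _ cs)
      | cons a b => exact ⟨a, b, rfl⟩
    by_cases hc : c = ' '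
    · subst hc
      rw [hw] at ih1
      constructor <;>
        simp [pvMach, pv_splitOn_cons, hw, pvCap, PySem.Chars.upper,
          PySem.Chars.join_cons_cons, ih1]
    · have hcap : pvCap (c :: w0) = PySem.Chars.upperChar c :: w0 := by
        simp [pvCap, PySem.Chars.upper]
      rw [hw] at ih2
      simp only [List.headI, List.tail] at ih2
      constructor
      · simp only [pvMach, if_neg hc, pv_splitOn_cons, hw, List.modifyHead, List.map_cons,
          hcap, pv_join_cons_head]
        rw [ih2]
      · simp only [pvMach, if_neg hc, pv_splitOn_cons, hw, List.modifyHead, List.headI,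
          List.tail, pv_join_cons_head]
        rw [ih2]

-- ===== VERDICT (by name: the statement is the Claim_ definition above) =====
theorem solve_spec : Claim_equal_solve := by
  intro s _
  show solve s = solve_alt s
  show String.mk (s.toList.foldl pvStep ([], true)).1 = _
  rw [pv_foldl_mach, (pv_mach_eq s.toList).1]
  simp only [solve_alt]
  congr 2
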